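-- pv_equiv track=rewrite | github.com/dominicfallows/dagster-ml-multi-code-location-template | 2_model_code_location/2_model/assets.py | group_vocab_by_synonym
-- ===== SOURCE A (Python) =====
-- SYNONYM_GROUPS = [
--     {"hello", "hi", "greetings"},
--     {"world", "earth", "globe"},
--     {"awesome", "great", "fantastic"},
--     {"test", "trial", "experiment"},
-- ]
--
-- def group_vocab_by_synonym(vocab):
--     """
--     Groups vocabulary words by predefined synonym sets.
--     Args:
--         vocab (list[str]): List of vocabulary words.
--     Returns:
--         list[list[str]]: Grouped vocabulary.
--     """
--     grouped = []
--     used = set()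
--     for word in vocab:
--         found = False
--         for group in SYNONYM_GROUPS:
--             if word in group:
--                 group_words = group & set(vocab)
--                 if group_words and not group_words.issubset(used):
--                     grouped.append(sorted(group_words))
--                     used.update(group_words)
--                 found = True
--                 break
--         if not found and word not in used:
--             grouped.append([word])
--             used.add(word)
--     return grouped
-- ===== SOURCE B (Python) =====
-- SYNONYM_GROUPS = [
--     {"hello", "hi", "greetings"},
--     {"world", "earth", "globe"},
--     {"awesome", "great", "fantastic"},
--     {"test", "trial", "experiment"},
-- ]
--
-- def group_vocab_by_synonym(vocab):
--     """
--     Groups vocabulary words by predefined synonym sets.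
--     Two-pass rewrite: collect the distinct keys (group index or the word
--     itself) in first-appearance order, then materialize each key.
--     """
--     index = {}
--     for i, group in enumerate(SYNONYM_GROUPS):
--         for w in group:
--             index[w] = i
--     vocab_set = set(vocab)
--     keys = []
--     seen = set()
--     for word in vocab:
--         key = index.get(word, word)
--         if key not in seen:
--             seen.add(key)
--             keys.append(key)
--     return [sorted(SYNONYM_GROUPS[k] & vocab_set) if isinstance(k, int) else [k]
--             for k in keys]
-- ===== Notes on version B (the rewrite author's own statement) =====
-- stated objective: alternative
-- what changed: Replaces A's single loop (per-word linear scan over SYNONYM_GROUPS plus set-subset checks against an accumulated 'used' set) with a precomputed word-to-group-index dict and two passes: collect distinct keys (group index or the word itself) in first-appearance order, then materialize each key as sorted(group & vocab_set) or [word].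
import Mathlib
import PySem

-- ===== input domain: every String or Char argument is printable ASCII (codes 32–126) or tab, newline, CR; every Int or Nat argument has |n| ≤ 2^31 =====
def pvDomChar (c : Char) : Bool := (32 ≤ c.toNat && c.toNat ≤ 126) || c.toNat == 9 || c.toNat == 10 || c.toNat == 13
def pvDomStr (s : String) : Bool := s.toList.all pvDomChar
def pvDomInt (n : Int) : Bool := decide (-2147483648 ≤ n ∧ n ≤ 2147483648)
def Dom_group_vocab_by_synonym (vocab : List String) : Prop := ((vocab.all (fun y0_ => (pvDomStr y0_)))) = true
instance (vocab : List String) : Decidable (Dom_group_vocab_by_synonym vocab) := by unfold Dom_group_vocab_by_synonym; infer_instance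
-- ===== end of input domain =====

-- B replaces A's per-word linear scan over SYNONYM_GROUPS (with set-subset checks against
-- the accumulated 'used' set) by a precomputed word→group-index dict and two passes:
-- collect the distinct keys in first-appearance order, then materialize each key (alternative decomposition).

-- ===== PORT A =====
-- module constant SYNONYM_GROUPS (shared by both ports)
def synGroups : List (PySem.Set String) :=
  [PySem.Set.ofList ["hello", "hi", "greetings"],
   PySem.Set.ofList ["world", "earth", "globe"],
   PySem.Set.ofList ["awesome", "great", "fantastic"],
   PySem.Set.ofList ["test", "trial", "experiment"]]

-- inner loop 'for group in SYNONYM_GROUPS: if word in group: … break' — first group containing word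
def findGroup (word : String) : List (PySem.Set String) → Option (PySem.Set String)
  | [] => none
  | g :: gs => if PySem.Set.contains g word then some g else findGroup word gs

-- outer loop of A, state = (grouped, used)
def aLoop (vocab : List String) :
    List String → List (List String) → PySem.Set String → List (List String)
  | [], grouped, _ => grouped
  | word :: rest, grouped, used =>
    match findGroup word synGroups with
    | some group =>
      let gw : PySem.Set String := PySem.Set.inter group (PySem.Set.ofList vocab)
      if !gw.isEmpty && !(PySem.Set.issubset gw used) then
        aLoop vocab rest (grouped ++ [PySem.List.sorted gw (fun x => x) false])
          (PySem.Set.update used gw)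
      else
        aLoop vocab rest grouped used
    | none =>
      if !(PySem.Set.contains used word) then
        aLoop vocab rest (grouped ++ [[word]]) (PySem.Set.add used word)
      else
        aLoop vocab rest grouped used

def group_vocab_by_synonym (vocab : List String) : List (List String) :=
  aLoop vocab vocab [] PySem.Set.empty

-- ===== PORT B =====
-- a dict key in Source B is an int (group index) or a str (the word itself)
inductive PKey
  | grp : Int → PKey
  | word : String → PKey
deriving DecidableEq, Repr

-- index: dict word → group index, built once from SYNONYM_GROUPS
def bIndex : PySem.Dict String Int :=
  (PySem.List.enumerate synGroups).foldl
    (fun d p => p.2.foldl (fun d w => d.insert w p.1) d) PySem.Dict.empty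

-- first pass: the distinct keys (group index PKey.grp i, or the word itself PKey.word w) in first-appearance order
def bKeys (index : PySem.Dict String Int) :
    List String → List (PKey) → PySem.Set (PKey) → List (PKey)
  | [], keys, _ => keys
  | word :: rest, keys, seen =>
    let key : PKey :=
      match index.get? word with
      | some i => PKey.grp i
      | none => PKey.word word
    if PySem.Set.contains seen key then bKeys index rest keys seen
    else bKeys index rest (keys ++ [key]) (PySem.Set.add seen key)

-- second pass: materialize a key
def renderKey (vocabSet : PySem.Set String) : (PKey) → List String
  | PKey.grp i =>
      PySem.List.sorted (PySem.Set.inter (PySem.List.pyGetD synGroups i ([] : PySem.Set String)) vocabSet)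
        (fun x => x) false
  | PKey.word w => [w]

def group_vocab_by_synonym_alt (vocab : List String) : List (List String) :=
  let vocabSet : PySem.Set String := PySem.Set.ofList vocab
  (bKeys bIndex vocab [] PySem.Set.empty).map (renderKey vocabSet)

-- ===== PRECONDITION & SPEC =====
def Spec_group_vocab_by_synonym (vocab : List String) (out : List (List String)) : Prop := out = group_vocab_by_synonym_alt vocab
instance (vocab : List String) (out : List (List String)) : Decidable (Spec_group_vocab_by_synonym vocab out) := by unfold Spec_group_vocab_by_synonym; infer_instance

-- ===== CLAIM (what is proved, stated in full; the proofs are below) =====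
def Claim_equal_group_vocab_by_synonym : Prop := ∀ (vocab : List String), Dom_group_vocab_by_synonym vocab → Spec_group_vocab_by_synonym vocab (group_vocab_by_synonym vocab)

-- ===== LEMMAS AND PROOFS =====

-- which group (if any) a word belongs to; groups are pairwise disjoint, so this is THE group
def classify (w : String) : Option Int :=
  if w ∈ ["hello", "hi", "greetings"] then some 0
  else if w ∈ ["world", "earth", "globe"] then some 1
  else if w ∈ ["awesome", "great", "fantastic"] then some 2
  else if w ∈ ["test", "trial", "experiment"] then some 3
  else none

def keyOf (w : String) : PKey :=
  match classify w with
  | some i => PKey.grp i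
  | none => PKey.word w

-- fusion of B's two passes
def fused (vocab : List String) : List String → PySem.Set (PKey) → List (List String)
  | [], _ => []
  | w :: rest, seen =>
    if PySem.Set.contains seen (keyOf w) then fused vocab rest seen
    else renderKey (PySem.Set.ofList vocab) (keyOf w) :: fused vocab rest (PySem.Set.add seen (keyOf w))


lemma bIndex_items : bIndex.items =
    [("hello", (0 : Int)), ("hi", 0), ("greetings", 0), ("world", 1), ("earth", 1), ("globe", 1),
     ("awesome", 2), ("great", 2), ("fantastic", 2), ("test", 3), ("trial", 3), ("experiment", 3)] := by
  decide

lemma get?_bIndex (w : String) : bIndex.get? w = classify w := by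
  unfold classify
  split_ifs with h0 h1 h2 h3
  · fin_cases h0 <;> decide
  · fin_cases h1 <;> decide
  · fin_cases h2 <;> decide
  · fin_cases h3 <;> decide
  · have hfind : List.find? (fun p => p.1 == w) bIndex.items = none := by
      rw [List.find?_eq_none]
      intro p hp
      rw [bIndex_items] at hp
      fin_cases hp <;> simp only [beq_iff_eq] <;> (intro h; subst h; simp_all)
    simp [PySem.Dict.get?, hfind]

lemma classify_some {w : String} {i : Int} (h : classify w = some i) :
    i = 0 ∨ i = 1 ∨ i = 2 ∨ i = 3 := by
  unfold classify at h
  split_ifs at h <;> simp_all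

lemma findGroup_eq (w : String) :
    findGroup w synGroups = (classify w).map (fun i => PySem.List.pyGetD synGroups i ([] : PySem.Set String)) := by
  unfold classify
  split_ifs with h0 h1 h2 h3
  · fin_cases h0 <;> decide
  · fin_cases h1 <;> decide
  · fin_cases h2 <;> decide
  · fin_cases h3 <;> decide
  · simp [findGroup, synGroups]
    split_ifs <;> simp_all

lemma mem_groupset {i : Int} (hi : i = 0 ∨ i = 1 ∨ i = 2 ∨ i = 3) (x : String) :
    x ∈ PySem.List.pyGetD synGroups i ([] : PySem.Set String) ↔ classify x = some i := by
  have p0 : PySem.List.pyGetD synGroups (0 : Int) ([] : PySem.Set String) = ["hello", "hi", "greetings"] := by decide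
  have p1 : PySem.List.pyGetD synGroups (1 : Int) ([] : PySem.Set String) = ["world", "earth", "globe"] := by decide
  have p2 : PySem.List.pyGetD synGroups (2 : Int) ([] : PySem.Set String) = ["awesome", "great", "fantastic"] := by decide
  have p3 : PySem.List.pyGetD synGroups (3 : Int) ([] : PySem.Set String) = ["test", "trial", "experiment"] := by decide
  rcases hi with h | h | h | h <;> subst h
  · rw [p0]; constructor
    · intro h
      simp only [List.mem_cons, List.not_mem_nil, or_false] at h
      rcases h with rfl | rfl | rfl <;> decide
    · intro h; unfold classify at h; split_ifs at h <;> simp_all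
  · rw [p1]; constructor
    · intro h
      simp only [List.mem_cons, List.not_mem_nil, or_false] at h
      rcases h with rfl | rfl | rfl <;> decide
    · intro h; unfold classify at h; split_ifs at h <;> simp_all
  · rw [p2]; constructor
    · intro h
      simp only [List.mem_cons, List.not_mem_nil, or_false] at h
      rcases h with rfl | rfl | rfl <;> decide
    · intro h; unfold classify at h; split_ifs at h <;> simp_all
  · rw [p3]; constructor
    · intro h
      simp only [List.mem_cons, List.not_mem_nil, or_false] at h
      rcases h with rfl | rfl | rfl <;> decide
    · intro h; unfold classify at h; split_ifs at h <;> simp_all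

-- loop invariant tying A's 'used' set to the set of already-seen keys
def INV (vocab : List String) (used : PySem.Set String) (seen : PySem.Set (PKey)) : Prop :=
  (∀ x : String, PKey.word x ∈ seen → classify x = none) ∧
  (∀ x : String, x ∈ used ↔ (∃ i, PKey.grp i ∈ seen ∧ classify x = some i ∧ x ∈ vocab) ∨ PKey.word x ∈ seen)

lemma bKeys_map (vocab : List String) :
    ∀ (rest : List String) (keys : List (PKey)) (seen : PySem.Set (PKey)),
      (bKeys bIndex rest keys seen).map (renderKey (PySem.Set.ofList vocab)) =
        keys.map (renderKey (PySem.Set.ofList vocab)) ++ fused vocab rest seen := by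
  intro rest
  induction rest with
  | nil => intro keys seen; simp [bKeys, fused]
  | cons w rest ih =>
    intro keys seen
    have hk : (match bIndex.get? w with
        | some i => PKey.grp i
        | none => PKey.word w) = keyOf w := by
      rw [get?_bIndex]; unfold keyOf; rfl
    by_cases hc : keyOf w ∈ seen <;>
      simp [bKeys, fused, hk, List.contains_eq_mem, hc, ih]

lemma aLoop_eq (vocab : List String) :
    ∀ (rest : List String) (grouped : List (List String)) (used : PySem.Set String)
      (seen : PySem.Set (PKey)),
      (∀ w ∈ rest, w ∈ vocab) → INV vocab used seen →
      aLoop vocab rest grouped used = grouped ++ fused vocab rest seen := by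
  intro rest
  induction rest with
  | nil => intro grouped used seen _ _; simp [aLoop, fused]
  | cons w rest ih =>
    intro grouped used seen hsub hinv
    obtain ⟨h2, h3⟩ := hinv
    have hwv : w ∈ vocab := hsub w (List.mem_cons_self)
    have hsub' : ∀ x ∈ rest, x ∈ vocab := fun x hx => hsub x (List.mem_cons_of_mem _ hx)
    cases hcl : classify w with
    | some i =>
      have hksome : keyOf w = PKey.grp i := by unfold keyOf; rw [hcl]
      have hi4 : i = 0 ∨ i = 1 ∨ i = 2 ∨ i = 3 := classify_some hcl
      have hgw : ∀ x : String,
          x ∈ PySem.Set.inter (PySem.List.pyGetD synGroups i ([] : PySem.Set String)) (PySem.Set.ofList vocab)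
            ↔ classify x = some i ∧ x ∈ vocab := by
        intro x
        rw [PySem.Set.mem_inter, mem_groupset hi4, PySem.Set.mem_ofList]
      have hwgw : w ∈ PySem.Set.inter (PySem.List.pyGetD synGroups i ([] : PySem.Set String)) (PySem.Set.ofList vocab) :=
        (hgw w).2 ⟨hcl, hwv⟩
      have hne : (PySem.Set.inter (PySem.List.pyGetD synGroups i ([] : PySem.Set String)) (PySem.Set.ofList vocab)).isEmpty = false := by
        cases he : PySem.Set.inter (PySem.List.pyGetD synGroups i ([] : PySem.Set String)) (PySem.Set.ofList vocab)
        · rw [he] at hwgw; cases hwgw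
        · rfl
      have hss : PySem.Set.issubset
          (PySem.Set.inter (PySem.List.pyGetD synGroups i ([] : PySem.Set String)) (PySem.Set.ofList vocab)) used
          = decide (PKey.grp i ∈ seen) := by
        by_cases hin : PKey.grp i ∈ seen
        · simp only [hin, decide_true]
          refine (PySem.Set.issubset_iff _ _).2 ?_
          intro x hx
          rcases (hgw x).1 hx with ⟨hcx, hxv⟩
          exact (h3 x).2 (Or.inl ⟨i, hin, hcx, hxv⟩)
        · simp only [hin, decide_false]
          cases hb : PySem.Set.issubset
              (PySem.Set.inter (PySem.List.pyGetD synGroups i ([] : PySem.Set String)) (PySem.Set.ofList vocab)) used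
          · rfl
          · exfalso
            have hw := (PySem.Set.issubset_iff _ _).1 hb w hwgw
            rcases (h3 w).1 hw with ⟨j, hj, hcj, _⟩ | hr
            · rw [hcl] at hcj; cases hcj; exact hin hj
            · rw [h2 w hr] at hcl; cases hcl
      rw [aLoop, findGroup_eq w, hcl]
      simp only [Option.map_some, hne, hss, Bool.not_false, Bool.true_and]
      by_cases hin : PKey.grp i ∈ seen
      · simp only [hin, decide_true, Bool.not_true, Bool.false_eq_true, if_false]
        rw [ih grouped used seen hsub' ⟨h2, h3⟩]
        rw [fused, hksome]
        simp [PySem.Set.contains_eq_listContains, List.contains_eq_mem, hin]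
      · simp only [hin, decide_false, Bool.not_false, if_true]
        have hinv' : INV vocab
            (PySem.Set.update used (PySem.Set.inter (PySem.List.pyGetD synGroups i ([] : PySem.Set String)) (PySem.Set.ofList vocab)))
            (PySem.Set.add seen (PKey.grp i)) := by
          refine ⟨?_, ?_⟩
          · intro x hx
            rcases (PySem.Set.mem_add _ _ _).1 hx with hx | hx
            · exact h2 x hx
            · exact PKey.noConfusion hx
          · intro x
            rw [PySem.Set.mem_update, h3 x, hgw x]
            constructor
            · rintro ((⟨j, hj, hcj, hxv⟩ | hr) | ⟨hcx, hxv⟩)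
              · exact Or.inl ⟨j, (PySem.Set.mem_add _ _ _).2 (Or.inl hj), hcj, hxv⟩
              · exact Or.inr ((PySem.Set.mem_add _ _ _).2 (Or.inl hr))
              · exact Or.inl ⟨i, (PySem.Set.mem_add _ _ _).2 (Or.inr rfl), hcx, hxv⟩
            · rintro (⟨j, hj, hcj, hxv⟩ | hr)
              · rcases (PySem.Set.mem_add _ _ _).1 hj with hj | hj
                · exact Or.inl (Or.inl ⟨j, hj, hcj, hxv⟩)
                · injection hj with hj; subst hj; exact Or.inr ⟨hcj, hxv⟩
              · rcases (PySem.Set.mem_add _ _ _).1 hr with hr | hr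
                · exact Or.inl (Or.inr hr)
                · exact PKey.noConfusion hr
        rw [ih _ _ _ hsub' hinv']
        rw [fused, hksome]
        simp [PySem.Set.contains_eq_listContains, List.contains_eq_mem, hin, renderKey]
    | none =>
      have hknone : keyOf w = PKey.word w := by unfold keyOf; rw [hcl]
      have hused : PySem.Set.contains used w = decide (PKey.word w ∈ seen) := by
        rw [PySem.Set.contains_eq_listContains, List.contains_eq_mem]
        by_cases hin : PKey.word w ∈ seen
        · simp only [hin, decide_true]
          simp [(h3 w).2 (Or.inr hin)]
        · simp only [hin, decide_false]
          have hwnot : w ∉ used := by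
            intro hw
            rcases (h3 w).1 hw with ⟨j, _, hcj, _⟩ | hr
            · rw [hcl] at hcj; cases hcj
            · exact hin hr
          simp [hwnot]
      rw [aLoop, findGroup_eq w, hcl]
      simp only [Option.map_none]
      by_cases hin : PKey.word w ∈ seen
      · simp only [hused, hin, decide_true, Bool.not_true, Bool.false_eq_true, if_false]
        rw [ih grouped used seen hsub' ⟨h2, h3⟩]
        rw [fused, hknone]
        simp [PySem.Set.contains_eq_listContains, List.contains_eq_mem, hin]
      · simp only [hused, hin, decide_false, Bool.not_false, if_true]
        have hinv' : INV vocab (PySem.Set.add used w) (PySem.Set.add seen (PKey.word w)) := by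
          refine ⟨?_, ?_⟩
          · intro x hx
            rcases (PySem.Set.mem_add _ _ _).1 hx with hx | hx
            · exact h2 x hx
            · injection hx with hx; subst hx; exact hcl
          · intro x
            rw [PySem.Set.mem_add, h3 x]
            constructor
            · rintro ((⟨j, hj, hcj, hxv⟩ | hr) | hxw)
              · exact Or.inl ⟨j, (PySem.Set.mem_add _ _ _).2 (Or.inl hj), hcj, hxv⟩
              · exact Or.inr ((PySem.Set.mem_add _ _ _).2 (Or.inl hr))
              · subst hxw; exact Or.inr ((PySem.Set.mem_add _ _ _).2 (Or.inr rfl))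
            · rintro (⟨j, hj, hcj, hxv⟩ | hr)
              · rcases (PySem.Set.mem_add _ _ _).1 hj with hj | hj
                · exact Or.inl (Or.inl ⟨j, hj, hcj, hxv⟩)
                · exact PKey.noConfusion hj
              · rcases (PySem.Set.mem_add _ _ _).1 hr with hr | hr
                · exact Or.inl (Or.inr hr)
                · injection hr with hr; subst hr; exact Or.inr rfl
        rw [ih _ _ _ hsub' hinv']
        rw [fused, hknone]
        simp [PySem.Set.contains_eq_listContains, List.contains_eq_mem, hin, renderKey]

-- ===== VERDICT (by name: the statement is the Claim_ definition above) =====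
theorem group_vocab_by_synonym_spec : Claim_equal_group_vocab_by_synonym := by
  intro vocab _
  unfold Spec_group_vocab_by_synonym group_vocab_by_synonym group_vocab_by_synonym_alt
  rw [bKeys_map vocab vocab [] PySem.Set.empty,
    aLoop_eq vocab vocab [] PySem.Set.empty PySem.Set.empty (fun _ h => h)
      ⟨fun x h => absurd h (List.not_mem_nil), fun x => by simp [PySem.Set.empty]⟩]
  simp
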